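-- pv_equiv track=rewrite | github.com/svdleer/PyPNMGui | fixofdm.py | compress_channel_ranges
-- ===== SOURCE A (Python) =====
-- def compress_channel_ranges(channels):
--     """
--     Compress a list of channels into range format with commas for gaps.
--     Example: ['12/scq/0', '12/scq/1', '12/scq/3', '12/scq/4'] -> ['12/scq/0-1,3-4']
--     """
--     if not channels:
--         return []
--
--     # Group channels by their prefix (e.g., '12/scq', '12/ofd')
--     channel_groups = {}
--     for ch in channels:
--         # Parse channel: '12/scq/5' -> prefix='12/scq', num=5
--         parts = ch.rsplit('/', 1)
--         if len(parts) == 2: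
--             prefix = parts[0]
--             try:
--                 num = int(parts[1])
--                 if prefix not in channel_groups:
--                     channel_groups[prefix] = []
--                 channel_groups[prefix].append(num)
--             except ValueError:
--                 # If not a number, keep as-is
--                 if 'other' not in channel_groups:
--                     channel_groups['other'] = []
--                 channel_groups['other'].append(ch)
--
--     # Build compressed ranges - SCQ channels must come before OFD channels
--     compressed = []
--
--     # Custom sort: scq before ofd, then alphabetically
--     def channel_sort_key(prefix):
--         if prefix == 'other':
--             return (2, prefix)  # Other last
--         elif '/scq' in prefix:
--             return (0, prefix)  # SCQ first
--         elif '/ofd' in prefix: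
--             return (1, prefix)  # OFD second
--         else:
--             return (2, prefix)  # Everything else last
--
--     for prefix in sorted(channel_groups.keys(), key=channel_sort_key):
--         if prefix == 'other':
--             compressed.extend(channel_groups[prefix])
--             continue
--
--         nums = sorted(channel_groups[prefix])
--
--         # Find consecutive ranges
--         ranges = []
--         start = nums[0]
--         end = nums[0]
--
--         for i in range(1, len(nums)):
--             if nums[i] == end + 1:
--                 # Consecutive
--                 end = nums[i]
--             else:
--                 # Gap found, save current range
--                 if start == end:
--                     ranges.append(f"{start}")
--                 else:
--                     ranges.append(f"{start}-{end}")
--                 start = nums[i]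
--                 end = nums[i]
--
--         # Save last range
--         if start == end:
--             ranges.append(f"{start}")
--         else:
--             ranges.append(f"{start}-{end}")
--
--         # Combine all ranges for this prefix with commas
--         compressed.append(f"{prefix}/{','.join(ranges)}")
--
--     return compressed
-- ===== SOURCE B (Python) =====
-- def compress_channel_ranges(channels):
--     """
--     Compress a list of channels into range format with commas for gaps.
--     Same behaviour as A, but grouping keeps non-numeric channels in a separate
--     'others' list, and consecutive runs are found by a zip-of-adjacent-pairs
--     boundary computation instead of a stateful start/end scan.
--     """
--     groups = {}
--     others = []
--     for ch in channels:
--         prefix, sep, last = ch.rpartition('/')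
--         if not sep:
--             continue
--         try:
--             n = int(last)
--         except ValueError:
--             others.append(ch)
--         else:
--             groups[prefix] = groups.get(prefix, []) + [n]
--
--     def channel_sort_key(prefix):
--         if prefix == 'other':
--             return (2, prefix)
--         elif '/scq' in prefix:
--             return (0, prefix)
--         elif '/ofd' in prefix:
--             return (1, prefix)
--         else:
--             return (2, prefix)
--
--     keys = sorted(list(groups) + (['other'] if others else []), key=channel_sort_key)
--
--     out = []
--     for prefix in keys:
--         if prefix == 'other':
--             out.extend(others)
--             continue
--         nums = sorted(groups[prefix])
--         pairs = list(zip(nums, nums[1:]))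
--         firsts = [nums[0]] + [b for a, b in pairs if b != a + 1]
--         lasts = [a for a, b in pairs if b != a + 1] + [nums[-1]]
--         ranges = [str(a) if a == b else f"{a}-{b}" for a, b in zip(firsts, lasts)]
--         out.append(f"{prefix}/{','.join(ranges)}")
--     return out
-- ===== Notes on version B (the rewrite author's own statement) =====
-- stated objective: alternative
-- what changed: B finds consecutive ranges by zipping the sorted numbers with their own tail and reading off run boundaries (first/last lists joined by zip) instead of A's stateful start/end scan, and keeps non-numeric channels in a separate 'others' list merged at sort time instead of A's heterogeneous 'other' dict key.
-- outside the precondition, e.g. on compress_channel_ranges(['other/5']): A returns [5], B returns []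
import Mathlib
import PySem

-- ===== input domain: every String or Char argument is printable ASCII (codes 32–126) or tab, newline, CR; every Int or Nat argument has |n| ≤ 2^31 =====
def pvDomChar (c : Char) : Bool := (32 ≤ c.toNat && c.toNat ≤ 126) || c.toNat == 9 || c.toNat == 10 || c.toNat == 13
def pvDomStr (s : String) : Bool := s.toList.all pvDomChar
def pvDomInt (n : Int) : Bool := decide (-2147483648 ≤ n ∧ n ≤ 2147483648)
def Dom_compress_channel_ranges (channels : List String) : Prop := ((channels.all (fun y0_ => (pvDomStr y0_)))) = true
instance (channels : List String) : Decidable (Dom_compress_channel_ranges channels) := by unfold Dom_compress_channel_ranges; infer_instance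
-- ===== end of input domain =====

-- B replaces A's stateful start/end range scan by a zip-of-adjacent-pairs boundary
-- computation and keeps non-numeric channels in a separate list instead of a sentinel
-- dict key (objective: alternative decomposition, same cost).

-- ===== PORT A =====
-- sort-key helper: both Pythons define literally this same inner function channel_sort_key
-- (only the Int class is returned here; the tuple's second component is the prefix itself)
def pvKeyClass (p : String) : Int :=
  if p = "other" then 2
  else if PySem.Str.isIn "/scq" p then 0
  else if PySem.Str.isIn "/ofd" p then 1
  else 2

-- ch.rsplit('/', 1), hand-ported (exact: split at the LAST '/' if any, else [ch])
def pvRsplit1 (s : String) : List String :=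
  let i := PySem.Str.rfind s "/"
  if i = -1 then [s]
  else [PySem.Str.slice s none (some i), PySem.Str.slice s (some (i + 1)) none]

-- the body of A's 'for ch in channels' grouping loop; the Python dict holds lists of
-- ints under numeric prefixes and lists of raw channel strings under 'other', so the
-- value type is the heterogeneous List (Int ⊕ String)
def pvGroupStepA (d : PySem.Dict String (List (Int ⊕ String))) (ch : String) :
    PySem.Dict String (List (Int ⊕ String)) :=
  let parts := pvRsplit1 ch
  if parts.length = 2 then
    let pfx := parts.getD 0 ""
    match PySem.Int.ofStr? (parts.getD 1 "") with
    | some num =>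
      let d1 := if d.contains pfx then d else d.insert pfx []
      d1.insert pfx (d1.getD pfx [] ++ [Sum.inl num])
    | none =>
      let d1 := if d.contains "other" then d else d.insert "other" []
      d1.insert "other" (d1.getD "other" [] ++ [Sum.inr ch])
  else d

def compress_channel_ranges (channels : List String) : List String :=
  if channels = [] then []
  else
    let d := channels.foldl pvGroupStepA PySem.Dict.empty
    let sortedKeys := PySem.List.sorted2 d.keys pvKeyClass (fun p => p) false
    sortedKeys.foldl (fun compressed pfx =>
      if pfx = "other" then
        compressed ++ (d.getD pfx []).filterMap
          (fun v => match v with | Sum.inr s => some s | Sum.inl _ => none)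
      else
        let nums := PySem.List.sorted
          ((d.getD pfx []).filterMap
            (fun v => match v with | Sum.inl n => some n | Sum.inr _ => none))
          (fun n => n) false
        let st := (PySem.List.pyRange 1 (PySem.List.len nums)).foldl
          (fun (st : List String × Int × Int) i =>
            let ni := PySem.List.pyGetD nums i 0
            if ni = st.2.2 + 1 then (st.1, st.2.1, ni)
            else (st.1 ++ [if st.2.1 = st.2.2 then PySem.Int.toStr st.2.1
                           else PySem.Int.toStr st.2.1 ++ "-" ++ PySem.Int.toStr st.2.2],
                  ni, ni))
          ([], PySem.List.pyGetD nums 0 0, PySem.List.pyGetD nums 0 0)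
        let ranges := st.1 ++ [if st.2.1 = st.2.2 then PySem.Int.toStr st.2.1
                               else PySem.Int.toStr st.2.1 ++ "-" ++ PySem.Int.toStr st.2.2]
        compressed ++ [pfx ++ "/" ++ PySem.Str.join "," ranges]) []

-- ===== PORT B =====
-- the body of B's grouping loop; ch.rpartition('/') is hand-ported via rfind
-- (exact: the last '/' splits the string; no '/' means sep == '' i.e. skip)
def pvGroupStepB (st : PySem.Dict String (List Int) × List String) (ch : String) :
    PySem.Dict String (List Int) × List String :=
  let i := PySem.Str.rfind ch "/"
  if i = -1 then st
  else
    let pfx := PySem.Str.slice ch none (some i)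
    let lastPart := PySem.Str.slice ch (some (i + 1)) none
    match PySem.Int.ofStr? lastPart with
    | none => (st.1, st.2 ++ [ch])
    | some n => (st.1.insert pfx (st.1.getD pfx [] ++ [n]), st.2)

def compress_channel_ranges_alt (channels : List String) : List String :=
  let gs := channels.foldl pvGroupStepB (PySem.Dict.empty, [])
  let keys := PySem.List.sorted2 (gs.1.keys ++ (if gs.2 = [] then [] else ["other"]))
                pvKeyClass (fun p => p) false
  keys.foldl (fun out pfx =>
    if pfx = "other" then out ++ gs.2
    else
      let nums := PySem.List.sorted (gs.1.getD pfx []) (fun n => n) false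
      let pairs := nums.zip (PySem.List.slice nums (some 1) none)
      let brk := pairs.filter (fun p => p.2 != p.1 + 1)
      let firsts := [PySem.List.pyGetD nums 0 0] ++ brk.map (·.2)
      let lasts := brk.map (·.1) ++ [PySem.List.pyGetD nums (-1) 0]
      let ranges := (firsts.zip lasts).map
        (fun p => if p.1 = p.2 then PySem.Int.toStr p.1
                  else PySem.Int.toStr p.1 ++ "-" ++ PySem.Int.toStr p.2)
      out ++ [pfx ++ "/" ++ PySem.Str.join "," ranges]) []

-- ===== PRECONDITION & SPEC =====
-- Pre_ excludes lists containing a channel 'other/<int>': there A appends raw ints to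
-- the returned list (e.g. ['other/5'] -> [5], not a list of strings, colliding with the
-- 'other' sentinel key), so A's value is not of the declared type.
def Pre_compress_channel_ranges (channels : List String) : Prop :=
  ∀ ch ∈ channels,
    ¬ (PySem.Str.rfind ch "/" ≠ -1 ∧
       PySem.Str.slice ch none (some (PySem.Str.rfind ch "/")) = "other" ∧
       (PySem.Int.ofStr? (PySem.Str.slice ch (some (PySem.Str.rfind ch "/" + 1)) none)).isSome)
instance (channels : List String) : Decidable (Pre_compress_channel_ranges channels) := by
  unfold Pre_compress_channel_ranges; infer_instance

def pvWitness_compress_channel_ranges : List String :=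
  ["12/scq/0", "12/scq/1", "12/scq/3", "12/ofd/7", "weird"]

def Spec_compress_channel_ranges (channels : List String) (out : List String) : Prop :=
  out = compress_channel_ranges_alt channels
instance (channels : List String) (out : List String) :
    Decidable (Spec_compress_channel_ranges channels out) := by
  unfold Spec_compress_channel_ranges; infer_instance

-- ===== CLAIM (what is proved, stated in full; the proofs are below) =====
def Claim_equal_compress_channel_ranges : Prop :=
  ∀ (channels : List String), Dom_compress_channel_ranges channels →
    Pre_compress_channel_ranges channels →
    Spec_compress_channel_ranges channels (compress_channel_ranges channels)

-- ===== LEMMAS AND PROOFS =====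

-- ---- range formatting: both ports compute pvRuns of the current run ----
def pvFmt (s e : Int) : String :=
  if s = e then PySem.Int.toStr s else PySem.Int.toStr s ++ "-" ++ PySem.Int.toStr e

def pvRuns (s e : Int) : List Int → List String
  | [] => [pvFmt s e]
  | n :: t => if n = e + 1 then pvRuns s n t else pvFmt s e :: pvRuns n n t

def pvScanStep (st : List String × Int × Int) (n : Int) : List String × Int × Int :=
  if n = st.2.2 + 1 then (st.1, st.2.1, n) else (st.1 ++ [pvFmt st.2.1 st.2.2], n, n)

lemma pvScanA (t : List Int) : ∀ (r0 : List String) (s e : Int),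
    (t.foldl pvScanStep (r0, s, e)).1
      ++ [pvFmt (t.foldl pvScanStep (r0, s, e)).2.1 (t.foldl pvScanStep (r0, s, e)).2.2]
      = r0 ++ pvRuns s e t := by
  induction t with
  | nil => intro r0 s e; simp [pvRuns]
  | cons n t ih =>
    intro r0 s e
    by_cases h : n = e + 1
    · simp only [List.foldl_cons, pvScanStep, if_pos h, pvRuns, ih]
    · simp only [List.foldl_cons, pvScanStep, if_neg h, pvRuns, ih, List.append_assoc,
        List.singleton_append]

lemma pvZipB (t : List Int) : ∀ (s e : Int),
    ((s :: (((e :: t).zip t).filter (fun p => p.2 != p.1 + 1)).map (·.2)).zip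
      ((((e :: t).zip t).filter (fun p => p.2 != p.1 + 1)).map (·.1) ++ [t.getLastD e])).map
        (fun p => pvFmt p.1 p.2)
      = pvRuns s e t := by
  induction t with
  | nil => intro s e; simp [pvRuns]
  | cons n t ih =>
    intro s e
    have hz : (e :: n :: t).zip (n :: t) = (e, n) :: (n :: t).zip t := rfl
    rw [hz, List.getLastD_cons]
    by_cases h : n = e + 1
    · have hp : ((n : Int) != e + 1) = false := by simp [h]
      simp only [List.filter_cons, hp, Bool.false_eq_true, if_false, pvRuns, if_pos h]
      exact ih s n
    · have hp : ((n : Int) != e + 1) = true := by simp [h]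
      simp only [List.filter_cons, hp, if_true, pvRuns, if_neg h, List.map_cons]
      exact congrArg (pvFmt s e :: ·) (ih n n)

-- ---- dict append-step shapes ----
lemma pvStepA_eq {ν : Type} (d : PySem.Dict String (List ν)) (p : String) (v : ν) :
    (let d1 := if d.contains p then d else d.insert p [];
     d1.insert p (d1.getD p [] ++ [v])) = d.insert p (d.getD p [] ++ [v]) := by
  by_cases h : d.contains p
  · simp [h]
  · simp only [Bool.not_eq_true] at h
    simp [h, PySem.Dict.getD_of_not_contains d [] h, PySem.Dict.getD_insert_self,
      PySem.Dict.insert_insert_self]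

lemma pvKeys_step {ν : Type} (d : PySem.Dict String (List ν)) (p : String) (v : ν) :
    (d.insert p (d.getD p [] ++ [v])).keys = if d.contains p then d.keys else d.keys ++ [p] := by
  by_cases h : d.contains p
  · simp [h, PySem.Dict.keys_insert_of_contains d _ h]
  · simp only [Bool.not_eq_true] at h
    simp [h, PySem.Dict.keys_insert_of_not_contains d _ h]

lemma pvGetD_step {ν : Type} (d : PySem.Dict String (List ν)) (p q : String) (v : ν) :
    (d.insert p (d.getD p [] ++ [v])).getD q [] =
      if q = p then d.getD p [] ++ [v] else d.getD q [] := by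
  simp [PySem.Dict.getD_insert]

-- ---- the grouping invariant relating A's single dict to B's dict + others list ----
def pvOthTag (o : List String) : List String := if o = [] then [] else ["other"]

def pvInv (d : PySem.Dict String (List (Int ⊕ String)))
    (g : PySem.Dict String (List Int)) (o : List String) : Prop :=
  d.keys.Perm (g.keys ++ pvOthTag o) ∧
  (∀ p : String, p ≠ "other" → d.getD p [] = (g.getD p []).map Sum.inl) ∧
  d.getD "other" [] = o.map Sum.inr ∧
  g.keys.Nodup ∧ "other" ∉ g.keys ∧ (∀ p ∈ g.keys, g.getD p [] ≠ [])

def pvPreCh (ch : String) : Prop :=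
  ¬ (PySem.Str.rfind ch "/" ≠ -1 ∧
     PySem.Str.slice ch none (some (PySem.Str.rfind ch "/")) = "other" ∧
     (PySem.Int.ofStr? (PySem.Str.slice ch (some (PySem.Str.rfind ch "/" + 1)) none)).isSome)

lemma pvStepA_skip (d : PySem.Dict String (List (Int ⊕ String))) (ch : String)
    (hi : PySem.Str.rfind ch "/" = -1) : pvGroupStepA d ch = d := by
  unfold pvGroupStepA pvRsplit1
  simp only [hi]
  norm_num

lemma pvStepA_some (d : PySem.Dict String (List (Int ⊕ String))) (ch : String)
    (hi : ¬ PySem.Str.rfind ch "/" = -1) (n : Int)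
    (hn : PySem.Int.ofStr? (PySem.Str.slice ch (some (PySem.Str.rfind ch "/" + 1)) none) = some n) :
    pvGroupStepA d ch =
      (let pfx := PySem.Str.slice ch none (some (PySem.Str.rfind ch "/"));
       let d1 := if d.contains pfx then d else d.insert pfx [];
       d1.insert pfx (d1.getD pfx [] ++ [Sum.inl n])) := by
  unfold pvGroupStepA pvRsplit1
  simp only [if_neg hi, List.length_cons, List.length_nil, Nat.reduceAdd,
    List.getD_eq_getElem?_getD, List.getElem?_cons_zero, List.getElem?_cons_succ,
    Option.getD_some, hn, if_true]

lemma pvStepA_none (d : PySem.Dict String (List (Int ⊕ String))) (ch : String)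
    (hi : ¬ PySem.Str.rfind ch "/" = -1)
    (hn : PySem.Int.ofStr? (PySem.Str.slice ch (some (PySem.Str.rfind ch "/" + 1)) none) = none) :
    pvGroupStepA d ch =
      (let d1 := if d.contains "other" then d else d.insert "other" [];
       d1.insert "other" (d1.getD "other" [] ++ [Sum.inr ch])) := by
  unfold pvGroupStepA pvRsplit1
  simp only [if_neg hi, List.length_cons, List.length_nil, Nat.reduceAdd,
    List.getD_eq_getElem?_getD, List.getElem?_cons_zero, List.getElem?_cons_succ,
    Option.getD_some, hn, if_true]

lemma pvStepB_skip (st : PySem.Dict String (List Int) × List String) (ch : String)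
    (hi : PySem.Str.rfind ch "/" = -1) : pvGroupStepB st ch = st := by
  unfold pvGroupStepB
  simp only [hi, if_true]

lemma pvStepB_some (st : PySem.Dict String (List Int) × List String) (ch : String)
    (hi : ¬ PySem.Str.rfind ch "/" = -1) (n : Int)
    (hn : PySem.Int.ofStr? (PySem.Str.slice ch (some (PySem.Str.rfind ch "/" + 1)) none) = some n) :
    pvGroupStepB st ch =
      (st.1.insert (PySem.Str.slice ch none (some (PySem.Str.rfind ch "/")))
        (st.1.getD (PySem.Str.slice ch none (some (PySem.Str.rfind ch "/"))) [] ++ [n]), st.2) := by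
  unfold pvGroupStepB
  simp only [if_neg hi, hn]

lemma pvStepB_none (st : PySem.Dict String (List Int) × List String) (ch : String)
    (hi : ¬ PySem.Str.rfind ch "/" = -1)
    (hn : PySem.Int.ofStr? (PySem.Str.slice ch (some (PySem.Str.rfind ch "/" + 1)) none) = none) :
    pvGroupStepB st ch = (st.1, st.2 ++ [ch]) := by
  unfold pvGroupStepB
  simp only [if_neg hi, hn]

lemma pvInv_step (d : PySem.Dict String (List (Int ⊕ String)))
    (g : PySem.Dict String (List Int)) (o : List String) (ch : String)
    (hch : pvPreCh ch) (h : pvInv d g o) :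
    pvInv (pvGroupStepA d ch) (pvGroupStepB (g, o) ch).1 (pvGroupStepB (g, o) ch).2 := by
  obtain ⟨hperm, hval, hoth, hnd, hno, hne⟩ := h
  by_cases hi : PySem.Str.rfind ch "/" = -1
  · rw [pvStepA_skip d ch hi, pvStepB_skip _ ch hi]
    exact ⟨hperm, hval, hoth, hnd, hno, hne⟩
  · cases hn : PySem.Int.ofStr? (PySem.Str.slice ch (some (PySem.Str.rfind ch "/" + 1)) none) with
    | some n =>
      have hpfx : PySem.Str.slice ch none (some (PySem.Str.rfind ch "/")) ≠ "other" := by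
        intro he
        exact hch ⟨hi, he, by rw [hn]; rfl⟩
      rw [pvStepA_some d ch hi n hn, pvStepB_some _ ch hi n hn]
      set pfx := PySem.Str.slice ch none (some (PySem.Str.rfind ch "/")) with hpfxdef
      rw [pvStepA_eq]
      have hc : d.contains pfx = g.contains pfx := by
        rw [Bool.eq_iff_iff, PySem.Dict.contains_iff_mem_keys, PySem.Dict.contains_iff_mem_keys,
          hperm.mem_iff, List.mem_append]
        constructor
        · rintro (hm | hm)
          · exact hm
          · exfalso; unfold pvOthTag at hm
            rcases em (o = []) with ho | ho
            · simp [ho] at hm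
            · simp only [if_neg ho, List.mem_singleton] at hm; exact hpfx hm
        · exact Or.inl
      refine ⟨?_, ?_, ?_, PySem.Dict.nodup_keys_insert _ _ _ hnd, ?_, ?_⟩
      · rw [pvKeys_step, pvKeys_step, hc]
        by_cases hg : g.contains pfx
        · rw [if_pos hg, if_pos hg]; exact hperm
        · rw [if_neg hg, if_neg hg]
          refine (hperm.append_right [pfx]).trans ?_
          rw [List.append_assoc, List.append_assoc]
          exact (List.perm_append_comm (l₁ := pvOthTag o)).append_left g.keys
      · intro p hp
        rw [pvGetD_step, pvGetD_step]
        by_cases hppfx : p = pfx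
        · rw [if_pos hppfx, if_pos hppfx, hval pfx hpfx, List.map_append]; rfl
        · rw [if_neg hppfx, if_neg hppfx]; exact hval p hp
      · rw [pvGetD_step, if_neg (fun he => hpfx he.symm), Prod.snd]
        exact hoth
      · rw [pvKeys_step]
        by_cases hg : g.contains pfx
        · rw [if_pos hg]; exact hno
        · rw [if_neg hg, List.mem_append, List.mem_singleton]
          rintro (hm | hm)
          · exact hno hm
          · exact hpfx hm.symm
      · intro p hp
        rw [pvGetD_step]
        by_cases hppfx : p = pfx
        · rw [if_pos hppfx]; simp
        · rw [if_neg hppfx]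
          apply hne
          rw [pvKeys_step] at hp
          by_cases hg : g.contains pfx
          · rwa [if_pos hg] at hp
          · rw [if_neg hg, List.mem_append, List.mem_singleton] at hp
            rcases hp with hm | hm
            · exact hm
            · exact absurd hm hppfx
    | none =>
      rw [pvStepA_none d ch hi hn, pvStepB_none _ ch hi hn]
      rw [pvStepA_eq]
      have hc : d.contains "other" = !(o.isEmpty) := by
        rw [Bool.eq_iff_iff, PySem.Dict.contains_iff_mem_keys, hperm.mem_iff, List.mem_append]
        unfold pvOthTag
        rcases em (o = []) with ho | ho
        · simp [ho, hno]
        · simp [ho, hno]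
      refine ⟨?_, ?_, ?_, hnd, hno, hne⟩
      · rw [pvKeys_step, hc]
        rcases em (o = []) with ho | ho
        · subst ho
          simp only [List.isEmpty_nil, Bool.not_true, Bool.false_eq_true, if_false]
          have h2 : pvOthTag ([] ++ [ch]) = ["other"] := by unfold pvOthTag; simp
          rw [h2]
          have h1 : pvOthTag ([] : List String) = [] := by unfold pvOthTag; simp
          rw [h1, List.append_nil] at hperm
          exact hperm.append_right ["other"]
        · have h2 : o.isEmpty = false := by rwa [List.isEmpty_eq_false_iff]
          rw [h2]
          simp only [Bool.not_false, if_true]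
          have h3 : pvOthTag (o ++ [ch]) = pvOthTag o := by
            unfold pvOthTag
            rw [if_neg (by simp), if_neg ho]
          rw [h3]
          exact hperm
      · intro p hp
        rw [pvGetD_step, if_neg hp]
        exact hval p hp
      · rw [pvGetD_step, if_pos rfl, hoth, List.map_append]
        rfl

lemma pvInv_fold (l : List String) : ∀ (d : PySem.Dict String (List (Int ⊕ String)))
    (g : PySem.Dict String (List Int)) (o : List String),
    (∀ ch ∈ l, pvPreCh ch) → pvInv d g o →
    pvInv (l.foldl pvGroupStepA d) (l.foldl pvGroupStepB (g, o)).1 (l.foldl pvGroupStepB (g, o)).2 := by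
  induction l with
  | nil => intro d g o _ h; exact h
  | cons ch l ih =>
    intro d g o hpre h
    have h1 := pvInv_step d g o ch (hpre ch (by simp)) h
    simpa using ih (pvGroupStepA d ch) (pvGroupStepB (g, o) ch).1 (pvGroupStepB (g, o) ch).2
      (fun c hc => hpre c (by simp [hc])) h1

-- ---- sorted2 under permutation of lists with distinct keys ----
lemma pvSorted2_eq_lex {α : Type} (xs : List α) (k1 : α → Int) (k2 : α → String) :
    PySem.List.sorted2 xs k1 k2 false
      = PySem.List.sorted xs (fun a => toLex (k1 a, k2 a)) false := by
  have hbe : ∀ a b : α,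
      (decide (k1 a < k1 b) || (!decide (k1 b < k1 a) && decide (k2 a < k2 b)))
        = decide (toLex (k1 a, k2 a) < toLex (k1 b, k2 b)) := by
    intro a b
    rw [Bool.eq_iff_iff]
    simp only [Bool.or_eq_true, Bool.and_eq_true, Bool.not_eq_true',
      decide_eq_true_eq, decide_eq_false_iff_not, Prod.Lex.lt_iff, ofLex_toLex]
    constructor
    · rintro (h | ⟨h1, h2⟩)
      · exact Or.inl h
      · rcases lt_trichotomy (k1 a) (k1 b) with h3 | h3 | h3
        · exact Or.inl h3
        · exact Or.inr ⟨h3, h2⟩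
        · exact absurd h3 h1
    · rintro (h | ⟨h1, h2⟩)
      · exact Or.inl h
      · exact Or.inr ⟨by rw [h1]; exact lt_irrefl _, h2⟩
  have hf : (fun a b : α => decide (k1 a < k1 b) || (!decide (k1 b < k1 a) && decide (k2 a < k2 b)))
      = fun a b : α => decide (toLex (k1 a, k2 a) < toLex (k1 b, k2 b)) :=
    funext fun a => funext fun b => hbe a b
  show List.foldl _ [] xs = List.foldl _ [] xs
  rw [hf]

lemma pvSorted_eq_of_perm {α κ : Type} [LinearOrder κ] (key : α → κ)
    (hinj : Function.Injective key) {xs ys : List α} (h : xs.Perm ys) (hnd : ys.Nodup) :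
    PySem.List.sorted xs key = PySem.List.sorted ys key := by
  apply PySem.List.sorted_eq_of_perm_of_pairwise_lt
  · exact (PySem.List.sorted_perm ys key false).trans h.symm
  · have h1 := PySem.List.sorted_pairwise ys key
    have h2 : (PySem.List.sorted ys key).Nodup :=
      ((PySem.List.sorted_perm ys key false).nodup_iff).mpr hnd
    exact (List.Pairwise.and h1 h2).imp
      (fun hab => lt_of_le_of_ne hab.1 (fun he => hab.2 (hinj he)))

lemma pvRangesA_eq (x : Int) (t : List Int) :
    ((PySem.List.pyRange 1 (PySem.List.len (x :: t))).foldl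
        (fun (st : List String × Int × Int) i =>
          if PySem.List.pyGetD (x :: t) i 0 = st.2.2 + 1 then (st.1, st.2.1, PySem.List.pyGetD (x :: t) i 0)
          else (st.1 ++ [if st.2.1 = st.2.2 then PySem.Int.toStr st.2.1
                         else PySem.Int.toStr st.2.1 ++ "-" ++ PySem.Int.toStr st.2.2],
                PySem.List.pyGetD (x :: t) i 0, PySem.List.pyGetD (x :: t) i 0))
        ([], PySem.List.pyGetD (x :: t) 0 0, PySem.List.pyGetD (x :: t) 0 0)).1
      ++ [if ((PySem.List.pyRange 1 (PySem.List.len (x :: t))).foldl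
        (fun (st : List String × Int × Int) i =>
          if PySem.List.pyGetD (x :: t) i 0 = st.2.2 + 1 then (st.1, st.2.1, PySem.List.pyGetD (x :: t) i 0)
          else (st.1 ++ [if st.2.1 = st.2.2 then PySem.Int.toStr st.2.1
                         else PySem.Int.toStr st.2.1 ++ "-" ++ PySem.Int.toStr st.2.2],
                PySem.List.pyGetD (x :: t) i 0, PySem.List.pyGetD (x :: t) i 0))
        ([], PySem.List.pyGetD (x :: t) 0 0, PySem.List.pyGetD (x :: t) 0 0)).2.1
          = ((PySem.List.pyRange 1 (PySem.List.len (x :: t))).foldl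
        (fun (st : List String × Int × Int) i =>
          if PySem.List.pyGetD (x :: t) i 0 = st.2.2 + 1 then (st.1, st.2.1, PySem.List.pyGetD (x :: t) i 0)
          else (st.1 ++ [if st.2.1 = st.2.2 then PySem.Int.toStr st.2.1
                         else PySem.Int.toStr st.2.1 ++ "-" ++ PySem.Int.toStr st.2.2],
                PySem.List.pyGetD (x :: t) i 0, PySem.List.pyGetD (x :: t) i 0))
        ([], PySem.List.pyGetD (x :: t) 0 0, PySem.List.pyGetD (x :: t) 0 0)).2.2
          then PySem.Int.toStr ((PySem.List.pyRange 1 (PySem.List.len (x :: t))).foldl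
        (fun (st : List String × Int × Int) i =>
          if PySem.List.pyGetD (x :: t) i 0 = st.2.2 + 1 then (st.1, st.2.1, PySem.List.pyGetD (x :: t) i 0)
          else (st.1 ++ [if st.2.1 = st.2.2 then PySem.Int.toStr st.2.1
                         else PySem.Int.toStr st.2.1 ++ "-" ++ PySem.Int.toStr st.2.2],
                PySem.List.pyGetD (x :: t) i 0, PySem.List.pyGetD (x :: t) i 0))
        ([], PySem.List.pyGetD (x :: t) 0 0, PySem.List.pyGetD (x :: t) 0 0)).2.1
          else PySem.Int.toStr ((PySem.List.pyRange 1 (PySem.List.len (x :: t))).foldl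
        (fun (st : List String × Int × Int) i =>
          if PySem.List.pyGetD (x :: t) i 0 = st.2.2 + 1 then (st.1, st.2.1, PySem.List.pyGetD (x :: t) i 0)
          else (st.1 ++ [if st.2.1 = st.2.2 then PySem.Int.toStr st.2.1
                         else PySem.Int.toStr st.2.1 ++ "-" ++ PySem.Int.toStr st.2.2],
                PySem.List.pyGetD (x :: t) i 0, PySem.List.pyGetD (x :: t) i 0))
        ([], PySem.List.pyGetD (x :: t) 0 0, PySem.List.pyGetD (x :: t) 0 0)).2.1
            ++ "-" ++ PySem.Int.toStr ((PySem.List.pyRange 1 (PySem.List.len (x :: t))).foldl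
        (fun (st : List String × Int × Int) i =>
          if PySem.List.pyGetD (x :: t) i 0 = st.2.2 + 1 then (st.1, st.2.1, PySem.List.pyGetD (x :: t) i 0)
          else (st.1 ++ [if st.2.1 = st.2.2 then PySem.Int.toStr st.2.1
                         else PySem.Int.toStr st.2.1 ++ "-" ++ PySem.Int.toStr st.2.2],
                PySem.List.pyGetD (x :: t) i 0, PySem.List.pyGetD (x :: t) i 0))
        ([], PySem.List.pyGetD (x :: t) 0 0, PySem.List.pyGetD (x :: t) 0 0)).2.2]
      = pvRuns x x t := by
  have hstep : (fun (st : List String × Int × Int) i =>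
          if PySem.List.pyGetD (x :: t) i 0 = st.2.2 + 1 then (st.1, st.2.1, PySem.List.pyGetD (x :: t) i 0)
          else (st.1 ++ [if st.2.1 = st.2.2 then PySem.Int.toStr st.2.1
                         else PySem.Int.toStr st.2.1 ++ "-" ++ PySem.Int.toStr st.2.2],
                PySem.List.pyGetD (x :: t) i 0, PySem.List.pyGetD (x :: t) i 0))
      = (fun (st : List String × Int × Int) j => pvScanStep st (PySem.List.pyGetD (x :: t) j 0)) := rfl
  rw [hstep, PySem.List.foldl_pyRange_pyGetD (x :: t) 0 pvScanStep _ (by norm_num)]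
  have hd : (1 : Int).toNat = 1 := rfl
  rw [hd, List.drop_one, List.tail_cons, PySem.List.pyGetD_zero_cons]
  have h := pvScanA t [] x x
  simp only [pvFmt] at h
  simpa using h

lemma pvRangesB_eq (x : Int) (t : List Int) :
    (([PySem.List.pyGetD (x :: t) 0 0] ++
        (((x :: t).zip (PySem.List.slice (x :: t) (some 1) none)).filter
          (fun p => p.2 != p.1 + 1)).map (·.2)).zip
      ((((x :: t).zip (PySem.List.slice (x :: t) (some 1) none)).filter
          (fun p => p.2 != p.1 + 1)).map (·.1) ++ [PySem.List.pyGetD (x :: t) (-1) 0])).map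
        (fun p => if p.1 = p.2 then PySem.Int.toStr p.1
                  else PySem.Int.toStr p.1 ++ "-" ++ PySem.Int.toStr p.2)
      = pvRuns x x t := by
  rw [PySem.List.slice_from (x :: t) (by norm_num)]
  have hd : (1 : Int).toNat = 1 := rfl
  rw [hd, List.drop_one, List.tail_cons, PySem.List.pyGetD_zero_cons,
    PySem.List.pyGetD_neg_one (x :: t) 0 (List.cons_ne_nil x t),
    List.getLast_eq_getLastD]
  have h := pvZipB t x x
  simp only [pvFmt] at h
  simpa [List.singleton_append] using h

-- ===== VERDICT (by name: the statement is the Claim_ definition above) =====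
theorem compress_channel_ranges_spec : Claim_equal_compress_channel_ranges := by
  intro channels _ hpre
  unfold Spec_compress_channel_ranges compress_channel_ranges compress_channel_ranges_alt
  have hpre' : ∀ ch ∈ channels, pvPreCh ch := hpre
  by_cases hc : channels = []
  · subst hc; rfl
  · rw [if_neg hc]
    dsimp only []
    have hinit : pvInv PySem.Dict.empty PySem.Dict.empty [] := by
      refine ⟨?_, ?_, ?_, ?_, ?_, ?_⟩ <;>
        simp [pvOthTag, PySem.Dict.keys_empty, PySem.Dict.getD_empty]
    have hinv := pvInv_fold channels PySem.Dict.empty PySem.Dict.empty [] hpre' hinit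
    obtain ⟨hperm, hval, hoth, hnd, hno, hne⟩ := hinv
    have htag : (if (channels.foldl pvGroupStepB (PySem.Dict.empty, [])).2 = []
        then ([] : List String) else ["other"])
        = pvOthTag (channels.foldl pvGroupStepB (PySem.Dict.empty, [])).2 := rfl
    rw [htag]
    have hnd2 : ((channels.foldl pvGroupStepB (PySem.Dict.empty, [])).1.keys
        ++ pvOthTag (channels.foldl pvGroupStepB (PySem.Dict.empty, [])).2).Nodup := by
      rw [List.nodup_append]
      refine ⟨hnd, ?_, ?_⟩
      · unfold pvOthTag; split <;> simp
      · unfold pvOthTag; split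
        · simp
        · intro a ha b hb
          rw [List.mem_singleton] at hb
          subst hb
          exact fun he => hno (he ▸ ha)
    have hkeys : PySem.List.sorted2 (channels.foldl pvGroupStepA PySem.Dict.empty).keys
          pvKeyClass (fun p => p) false
        = PySem.List.sorted2 ((channels.foldl pvGroupStepB (PySem.Dict.empty, [])).1.keys
            ++ pvOthTag (channels.foldl pvGroupStepB (PySem.Dict.empty, [])).2)
          pvKeyClass (fun p => p) false := by
      rw [pvSorted2_eq_lex, pvSorted2_eq_lex]
      exact pvSorted_eq_of_perm _
        (fun a b hab => by simpa using congrArg (fun q => (ofLex q).2) hab) hperm hnd2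
    rw [hkeys]
    apply PySem.List.foldl_congr_mem
    intro acc pfx hmem
    have hmem' : pfx ∈ (channels.foldl pvGroupStepB (PySem.Dict.empty, [])).1.keys
        ++ pvOthTag (channels.foldl pvGroupStepB (PySem.Dict.empty, [])).2 :=
      ((PySem.List.sorted2_perm _ _ _ _).mem_iff).mp hmem
    by_cases hp : pfx = "other"
    · rw [if_pos hp, if_pos hp, hp, hoth]
      congr 1
      simp [List.filterMap_map, Function.comp]
    · rw [if_neg hp, if_neg hp]
      have hpk : pfx ∈ (channels.foldl pvGroupStepB (PySem.Dict.empty, [])).1.keys := by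
        rcases List.mem_append.mp hmem' with h1 | h1
        · exact h1
        · exfalso
          unfold pvOthTag at h1
          rcases em ((channels.foldl pvGroupStepB (PySem.Dict.empty, [])).2 = []) with ho | ho
          · rw [if_pos ho] at h1; simp at h1
          · rw [if_neg ho, List.mem_singleton] at h1; exact hp h1
      rw [hval pfx hp]
      have hfm : (((channels.foldl pvGroupStepB (PySem.Dict.empty, [])).1.getD pfx []).map
            Sum.inl).filterMap
            (fun v : Int ⊕ String => match v with | Sum.inl n => some n | Sum.inr _ => none)
          = (channels.foldl pvGroupStepB (PySem.Dict.empty, [])).1.getD pfx [] := by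
        simp [List.filterMap_map, Function.comp]
      rw [hfm]
      have hnz : PySem.List.sorted ((channels.foldl pvGroupStepB (PySem.Dict.empty, [])).1.getD
          pfx []) (fun n => n) false ≠ [] := by
        rw [Ne, PySem.List.sorted_eq_nil_iff]
        exact hne pfx hpk
      obtain ⟨x, t, hxt⟩ := List.exists_cons_of_ne_nil hnz
      rw [hxt, pvRangesA_eq x t, pvRangesB_eq x t]
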